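-- pv_equiv track=rewrite | github.com/AbanobSoliman/IBISCape | ROS_tools/events2txt.py | mask_create
-- ===== SOURCE A (Python) =====
-- drop = 0
--
-- def mask_create(events_number):
--     mask = [True]
--     count = 1
--     for i in range(1, events_number):
--         if count == drop:
--             mask.append(True)
--             count = 1
--         else:
--             mask.append(False)
--         count += 1
--     return mask
-- ===== SOURCE B (Python) =====
-- def mask_create(events_number):
--     # drop == 0 in this module, so the append-True branch of the loop never fires:
--     # the mask is a single leading True followed by events_number-1 Falses.
--     return [True] + [False] * (events_number - 1)
-- ===== Notes on version B (the rewrite author's own statement) =====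
-- stated objective: simpler
-- what changed: Replaced the counting loop with a closed form: since drop=0 the True branch never fires, so the mask is [True] followed by (events_number-1) Falses built by list multiplication.
import Mathlib
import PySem

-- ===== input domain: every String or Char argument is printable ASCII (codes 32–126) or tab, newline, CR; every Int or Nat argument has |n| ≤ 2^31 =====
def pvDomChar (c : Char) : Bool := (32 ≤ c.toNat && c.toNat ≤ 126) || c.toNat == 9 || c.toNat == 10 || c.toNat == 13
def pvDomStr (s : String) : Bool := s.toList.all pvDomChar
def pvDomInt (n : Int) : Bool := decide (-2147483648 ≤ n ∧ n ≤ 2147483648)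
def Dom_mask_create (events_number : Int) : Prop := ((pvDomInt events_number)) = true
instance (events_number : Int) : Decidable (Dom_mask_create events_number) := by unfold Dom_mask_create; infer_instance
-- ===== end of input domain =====

-- B replaces A's counting loop by a closed form ([True] ++ (n-1) Falses), valid since drop = 0.

-- ===== PORT A =====
def drop : Int := 0

def mask_create (events_number : Int) : List Bool :=
  let s := (PySem.List.pyRange 1 events_number 1).foldl
    (fun (st : List Bool × Int) _ =>
      let (mask, count) := st
      if count = drop then (mask ++ [true], (1 : Int) + 1)
      else (mask ++ [false], count + 1))
    ([true], (1 : Int))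
  s.1

-- ===== PORT B =====
def mask_create_alt (events_number : Int) : List Bool :=
  [true] ++ List.replicate (events_number - 1).toNat false

-- ===== PRECONDITION & SPEC =====
def Spec_mask_create (events_number : Int) (out : List Bool) : Prop := out = mask_create_alt events_number
instance (events_number : Int) (out : List Bool) : Decidable (Spec_mask_create events_number out) := by unfold Spec_mask_create; infer_instance

-- ===== CLAIM (what is proved, stated in full; the proofs are below) =====
def Claim_equal_mask_create : Prop := ∀ (events_number : Int), Dom_mask_create events_number → Spec_mask_create events_number (mask_create events_number)

-- ===== LEMMAS AND PROOFS =====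
-- Loop invariant: while count ≥ 1, the True branch (count = 0) never fires, so each
-- iteration appends one false; the fold's mask is the initial mask plus one false per element.
theorem mask_create_loop (l : List Int) (mask : List Bool) (count : Int) (h : 1 ≤ count) :
    (l.foldl (fun (st : List Bool × Int) _ =>
      let (m, c) := st
      if c = drop then (m ++ [true], (1 : Int) + 1)
      else (m ++ [false], c + 1)) (mask, count)).1
    = mask ++ List.replicate l.length false := by
  induction l generalizing mask count with
  | nil => simp
  | cons x xs ih =>
    have hne : count ≠ drop := by unfold drop; omega
    simp only [List.foldl_cons, if_neg hne]
    rw [ih (mask ++ [false]) (count + 1) (by omega)]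
    simp [List.replicate_succ]

theorem mask_create_spec' (n : Int) : mask_create n = mask_create_alt n := by
  unfold mask_create mask_create_alt
  rw [mask_create_loop _ _ _ le_rfl, PySem.List.length_pyRange_one]

-- ===== VERDICT (by name: the statement is the Claim_ definition above) =====
theorem mask_create_spec : Claim_equal_mask_create := by
  intro n _
  exact mask_create_spec' n
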